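-- pv_equiv track=rewrite | github.com/MattInglisWhalen/FastFactor | my_math.py | is_lucas_prp
-- ===== SOURCE A (Python) =====
-- def is_lucas_prp(n, D):
--
--     Q = (1 - D) >> 2
--
--     # n+1 = 2**r*s where s is odd
--     s = n + 1
--     r = 0
--     while s & 1 == 0:
--         r += 1
--         s >>= 1
--
--     # calculate the bit reversal of (odd) s
--     # e.g. 19 (10011) <=> 25 (11001)
--     t = 0
--     while s:
--         if s & 1:
--             t += 1
--             s -= 1
--         else:
--             t <<= 1
--             s >>= 1
--
--     # use the same bit reversal process to calculate the sth Lucas number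
--     # keep track of q = Q**n as we go
--     U = 0
--     V = 2
--     q = 1
--     # mod_inv(2, n)
--     inv_2 = (n + 1) >> 1
--     while t:
--         if t & 1:
--             # U, V of n+1
--             U, V = ((U + V) * inv_2) % n, ((D * U + V) * inv_2) % n
--             q = (q * Q) % n
--             t -= 1
--         else:
--             # U, V of n*2
--             U, V = (U * V) % n, (V * V - 2 * q) % n
--             q = (q * q) % n
--             t >>= 1
--
--     # double s until we have the 2**r*sth Lucas number
--     while r:
--         U, V = (U * V) % n, (V * V - 2 * q) % n
--         q = (q * q) % n
--         r -= 1
--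
--     # primality check
--     # if n is prime, n divides the n+1st Lucas number, given the assumptions
--     return U == 0
-- ===== SOURCE B (Python) =====
-- def is_lucas_prp(n, D):
--     Q = (1 - D) >> 2
--     inv_2 = (n + 1) >> 1
--
--     # (U_k, V_k, Q**k) mod n of the Lucas chain, by direct recursion on the index k:
--     # halve an even index (doubling identities), step down from an odd one.
--     def uvq(k):
--         if k == 0:
--             return 0, 2, 1
--         if k % 2 == 0:
--             U, V, q = uvq(k // 2)
--             return (U * V) % n, (V * V - 2 * q) % n, (q * q) % n
--         U, V, q = uvq(k - 1)
--         return ((U + V) * inv_2) % n, ((D * U + V) * inv_2) % n, (q * Q) % n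
--
--     U, _, _ = uvq(n + 1)
--     return U == 0
-- ===== Notes on version B (the rewrite author's own statement) =====
-- stated objective: simpler
-- what changed: B replaces A's four staged while-loops (odd-part extraction, bit reversal, LSB-driven ladder, final doubling loop) by one short recursive function on the index k itself (halve an even k, decrement an odd k), called once at k=n+1.
import Mathlib
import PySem

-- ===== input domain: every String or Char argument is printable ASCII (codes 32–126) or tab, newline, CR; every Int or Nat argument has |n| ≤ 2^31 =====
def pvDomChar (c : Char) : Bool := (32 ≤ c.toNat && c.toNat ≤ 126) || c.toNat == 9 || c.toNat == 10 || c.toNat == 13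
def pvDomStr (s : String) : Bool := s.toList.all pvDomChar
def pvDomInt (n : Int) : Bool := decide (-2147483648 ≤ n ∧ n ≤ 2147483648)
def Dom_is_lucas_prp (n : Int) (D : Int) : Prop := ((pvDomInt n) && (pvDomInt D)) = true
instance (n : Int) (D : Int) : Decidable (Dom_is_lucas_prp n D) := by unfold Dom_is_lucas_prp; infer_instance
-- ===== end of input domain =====

-- B replaces A's four staged while-loops (odd-part extraction, bit reversal, LSB-driven
-- ladder, final doubling loop) by one short recursive function on the index k itself
-- (halve an even k, decrement an odd k), called once at k = n+1 (objective: simpler).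
-- Python '>>' is Lean's '>>> (k : Nat)' (arithmetic shift), '<<' is '<<<'.
-- Every while loop of A is ported with a fuel argument; each loop step strictly decreases
-- the driving variable's absolute value, so the fuel '<driving var>.natAbs + 1' passed at
-- the call site is never exhausted on inputs where the Python loop terminates; where
-- Python diverges (n ≤ -1) the fuel merely makes the definition total.

-- ===== PORT A =====
-- while s & 1 == 0: r += 1; s >>= 1
def pvOddA : Nat → Int → Int → Int × Int
  | 0, s, r => (s, r)
  | fuel + 1, s, r =>
    if PySem.Int.band s 1 = 0 then pvOddA fuel (s >>> (1:Nat)) (r + 1) else (s, r)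

-- bit-reversal loop: while s: if s & 1: t += 1; s -= 1 else: t <<= 1; s >>= 1
def pvRevA : Nat → Int → Int → Int
  | 0, _, t => t
  | fuel + 1, s, t =>
    if s = 0 then t
    else if PySem.Int.band s 1 = 1 then pvRevA fuel (s - 1) (t + 1)
    else pvRevA fuel (s >>> (1:Nat)) (t <<< (1:Nat))

-- while t: if t & 1: add-one step, t -= 1 else: doubling step, t >>= 1
def pvTLoopA (nv Dv Qv inv2 : Int) : Nat → Int → Int → Int → Int → Int × Int × Int
  | 0, _, U, V, q => (U, V, q)
  | fuel + 1, t, U, V, q =>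
    if t = 0 then (U, V, q)
    else if PySem.Int.band t 1 = 1 then
      pvTLoopA nv Dv Qv inv2 fuel (t - 1) (PySem.Int.mod ((U + V) * inv2) nv)
        (PySem.Int.mod ((Dv * U + V) * inv2) nv) (PySem.Int.mod (q * Qv) nv)
    else
      pvTLoopA nv Dv Qv inv2 fuel (t >>> (1:Nat)) (PySem.Int.mod (U * V) nv)
        (PySem.Int.mod (V * V - 2 * q) nv) (PySem.Int.mod (q * q) nv)

-- while r: doubling step, r -= 1
def pvRLoopA (nv : Int) : Nat → Int → Int → Int → Int → Int × Int × Int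
  | 0, _, U, V, q => (U, V, q)
  | fuel + 1, r, U, V, q =>
    if r = 0 then (U, V, q)
    else pvRLoopA nv fuel (r - 1) (PySem.Int.mod (U * V) nv)
      (PySem.Int.mod (V * V - 2 * q) nv) (PySem.Int.mod (q * q) nv)

def is_lucas_prp (n : Int) (D : Int) : Bool :=
  let Q := (1 - D) >>> (2:Nat)
  let sr := pvOddA ((n + 1).natAbs + 1) (n + 1) 0
  let t := pvRevA (sr.1.natAbs + 1) sr.1 0
  let inv2 := (n + 1) >>> (1:Nat)
  let m := pvTLoopA n D Q inv2 (t.natAbs + 1) t 0 2 1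
  let res := pvRLoopA n (sr.2.natAbs + 1) sr.2 m.1 m.2.1 m.2.2
  res.1 == 0

-- ===== PORT B =====
-- def uvq(k): if k == 0: (0,2,1); elif k % 2 == 0: doubling step of uvq(k//2);
-- else: add-one step of uvq(k-1).  The base-case guard is 'k ≤ 0' instead of Python's
-- 'k == 0' purely to make the recursion total; negative k is never reached (k = n+1 ≥ 2
-- under Pre_, and halving/decrementing a positive k stays nonnegative).
def pvUvqB (nv Dv Qv inv2 : Int) (k : Int) : Int × Int × Int :=
  if k ≤ 0 then (0, 2, 1)
  else if PySem.Int.mod k 2 = 0 then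
    let p := pvUvqB nv Dv Qv inv2 (PySem.Int.floordiv k 2)
    (PySem.Int.mod (p.1 * p.2.1) nv, PySem.Int.mod (p.2.1 * p.2.1 - 2 * p.2.2) nv,
      PySem.Int.mod (p.2.2 * p.2.2) nv)
  else
    let p := pvUvqB nv Dv Qv inv2 (k - 1)
    (PySem.Int.mod ((p.1 + p.2.1) * inv2) nv, PySem.Int.mod ((Dv * p.1 + p.2.1) * inv2) nv,
      PySem.Int.mod (p.2.2 * Qv) nv)
termination_by k.toNat
decreasing_by
  · simp only [PySem.Int.floordiv_eq_ediv_of_pos (by norm_num : (0:Int) < 2)]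
    omega
  · omega

def is_lucas_prp_alt (n : Int) (D : Int) : Bool :=
  let Q := (1 - D) >>> (2:Nat)
  let inv2 := (n + 1) >>> (1:Nat)
  (pvUvqB n D Q inv2 (n + 1)).1 == 0

-- ===== PRECONDITION & SPEC =====
-- Pre: exactly the inputs where Python's A terminates: for n = 0 it raises
-- ZeroDivisionError at '% n', and for every n < 0 one of its while loops never ends.
def Pre_is_lucas_prp (n : Int) (D : Int) : Prop := 1 ≤ n
instance (n : Int) (D : Int) : Decidable (Pre_is_lucas_prp n D) := by
  unfold Pre_is_lucas_prp; infer_instance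

def pvWitness_is_lucas_prp : Int × Int := (11, 5)

def Spec_is_lucas_prp (n : Int) (D : Int) (out : Bool) : Prop := out = is_lucas_prp_alt n D
instance (n : Int) (D : Int) (out : Bool) : Decidable (Spec_is_lucas_prp n D out) := by
  unfold Spec_is_lucas_prp; infer_instance

-- ===== CLAIM (what is proved, stated in full; the proofs are below) =====
def Claim_equal_is_lucas_prp : Prop := ∀ (n : Int) (D : Int), Dom_is_lucas_prp n D → Pre_is_lucas_prp n D → Spec_is_lucas_prp n D (is_lucas_prp n D)

-- ===== LEMMAS AND PROOFS =====

theorem pvShr1 (s : Int) : s >>> (1:Nat) = s / 2 := by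
  rw [Int.shiftRight_eq_div_pow]; norm_num

theorem pvShl1 (t : Int) : t <<< (1:Nat) = t * 2 := by
  rw [Int.shiftLeft_eq]; norm_num

theorem pvBand1 (s : Int) : PySem.Int.band s 1 = s % 2 := by
  rw [PySem.Int.band_one]; exact PySem.Int.mod_eq_emod_of_pos (by norm_num)

-- doubling and add-one steps as functions on the state triple
def pvDouble (nv : Int) (x : Int × Int × Int) : Int × Int × Int :=
  (PySem.Int.mod (x.1 * x.2.1) nv, PySem.Int.mod (x.2.1 * x.2.1 - 2 * x.2.2) nv,
    PySem.Int.mod (x.2.2 * x.2.2) nv)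

def pvAddOne (nv Dv Qv inv2 : Int) (x : Int × Int × Int) : Int × Int × Int :=
  (PySem.Int.mod ((x.1 + x.2.1) * inv2) nv, PySem.Int.mod ((Dv * x.1 + x.2.1) * inv2) nv,
    PySem.Int.mod (x.2.2 * Qv) nv)

def pvStep (nv Dv Qv inv2 : Int) (b : Bool) (x : Int × Int × Int) : Int × Int × Int :=
  if b then pvAddOne nv Dv Qv inv2 (pvDouble nv x) else pvDouble nv x

-- unfolding equations of pvUvqB on positive arguments
theorem pvUvqB_even (nv Dv Qv inv2 k : Int) (hk : 0 < k) (h : k % 2 = 0) :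
    pvUvqB nv Dv Qv inv2 k = pvDouble nv (pvUvqB nv Dv Qv inv2 (k / 2)) := by
  rw [pvUvqB, if_neg (by omega),
    PySem.Int.mod_eq_emod_of_pos (a := k) (by norm_num : (0:Int) < 2), if_pos h,
    PySem.Int.floordiv_eq_ediv_of_pos (a := k) (by norm_num : (0:Int) < 2)]
  rfl

theorem pvUvqB_odd (nv Dv Qv inv2 k : Int) (hk : 0 < k) (h : k % 2 = 1) :
    pvUvqB nv Dv Qv inv2 k = pvAddOne nv Dv Qv inv2 (pvUvqB nv Dv Qv inv2 (k - 1)) := by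
  rw [pvUvqB, if_neg (by omega),
    PySem.Int.mod_eq_emod_of_pos (a := k) (by norm_num : (0:Int) < 2), if_neg (by omega)]
  rfl

-- bits of s, most significant first (proof-side notion; exact for s ≥ 0)
def pvBitsB : Nat → Int → List Bool
  | 0, _ => []
  | fuel + 1, s =>
    if s ≤ 0 then [] else pvBitsB fuel (s >>> (1:Nat)) ++ [PySem.Int.band s 1 == 1]

-- MSB-first chain: for each bit, the doubling step then, on a set bit, the add-one step
def pvBitLoopB (nv Dv Qv inv2 : Int) : List Bool → Int → Int → Int → Int × Int × Int
  | [], U, V, q => (U, V, q)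
  | b :: bs, U, V, q =>
    let U1 := PySem.Int.mod (U * V) nv
    let V1 := PySem.Int.mod (V * V - 2 * q) nv
    let q1 := PySem.Int.mod (q * q) nv
    if b then
      pvBitLoopB nv Dv Qv inv2 bs (PySem.Int.mod ((U1 + V1) * inv2) nv)
        (PySem.Int.mod ((Dv * U1 + V1) * inv2) nv) (PySem.Int.mod (q1 * Qv) nv)
    else pvBitLoopB nv Dv Qv inv2 bs U1 V1 q1

-- value of a bit list read with its head as the LEAST significant bit
def pvFromBits : List Bool → Int
  | [] => 0
  | b :: bs => (if b then 1 else 0) + 2 * pvFromBits bs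

theorem pvFromBits_nonneg (l : List Bool) : 0 ≤ pvFromBits l := by
  induction l with
  | nil => simp [pvFromBits]
  | cons b bs ih => simp only [pvFromBits]; split <;> omega

theorem pvFromBits_concat (l : List Bool) (b : Bool) :
    pvFromBits (l ++ [b]) = pvFromBits l + (if b then 2 ^ l.length else 0) := by
  induction l with
  | nil => cases b <;> simp [pvFromBits]
  | cons c cs ih =>
    cases b <;> cases c <;>
      simp [pvFromBits, ih, List.length_cons, pow_succ] <;> ring

theorem pvBitsB_head (fuel : Nat) (s : Int) (hs : 1 ≤ s) (hf : s.natAbs < fuel) :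
    ∃ bs, pvBitsB fuel s = true :: bs := by
  induction fuel generalizing s with
  | zero => omega
  | succ k ih =>
    rw [pvBitsB, if_neg (by omega)]
    by_cases h1 : s = 1
    · subst h1
      refine ⟨[], ?_⟩
      rw [show (1:Int) >>> (1:Nat) = 0 by rw [pvShr1]; decide]
      have hz : pvBitsB k 0 = [] := by cases k <;> simp [pvBitsB]
      rw [hz]
      simp [pvBand1]
    · have h2 : 1 ≤ s >>> (1:Nat) := by rw [pvShr1]; omega
      obtain ⟨bs, hbs⟩ := ih (s >>> (1:Nat)) h2 (by rw [pvShr1]; omega)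
      exact ⟨bs ++ [PySem.Int.band s 1 == 1], by rw [hbs]; simp⟩

theorem pvBitsB_last (fuel : Nat) (s : Int) (hs : 1 ≤ s) (hf : s.natAbs < fuel)
    (hodd : s % 2 = 1) : (pvBitsB fuel s).getLast? = some true := by
  obtain ⟨k, rfl⟩ : ∃ k, fuel = k + 1 := ⟨fuel - 1, by omega⟩
  rw [pvBitsB, if_neg (by omega), List.getLast?_concat]
  simp [pvBand1, hodd]

theorem pvFromBits_pos_of_last (l : List Bool) (h : l.getLast? = some true) :
    0 < pvFromBits l := by
  induction l with
  | nil => simp at h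
  | cons b bs ih =>
    cases bs with
    | nil => simp at h; subst h; simp [pvFromBits]
    | cons c cs =>
      rw [List.getLast?_cons_cons] at h
      have h1 := ih h
      simp only [pvFromBits] at h1 ⊢
      omega

-- the bit-reversal loop computes the value of the bits of s read back to front,
-- with the accumulator t prepended above them
theorem pvRevA_val (fr : Nat) (s : Int) (hs : 1 ≤ s) (t : Int) (ht : 0 ≤ t)
    (hfr : s.natAbs < fr) (fb : Nat) (hfb : s.natAbs < fb) :
    pvRevA fr s t = pvFromBits (pvBitsB fb s) + t * 2 ^ ((pvBitsB fb s).length - 1) := by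
  induction fr using Nat.strong_induction_on generalizing s t fb with
  | _ fr ih =>
    obtain ⟨k, rfl⟩ : ∃ k, fr = k + 1 := ⟨fr - 1, by omega⟩
    obtain ⟨m, rfl⟩ : ∃ m, fb = m + 1 := ⟨fb - 1, by omega⟩
    by_cases hodd : s % 2 = 1
    · by_cases h1 : s = 1
      · subst h1
        rw [pvRevA, if_neg (by omega), if_pos (by rw [pvBand1]; decide)]
        obtain ⟨k0, rfl⟩ : ∃ k0, k = k0 + 1 := ⟨k - 1, by omega⟩
        rw [show (1:Int) - 1 = 0 by norm_num]
        rw [pvRevA, if_pos rfl]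
        rw [pvBitsB, if_neg (by omega), show (1:Int) >>> (1:Nat) = 0 by rw [pvShr1]; decide]
        have hz : pvBitsB m 0 = [] := by cases m <;> simp [pvBitsB]
        rw [hz]
        simp [pvFromBits, pvBand1]
        omega
      · -- s odd, s ≥ 3 : one add step then the even step on s - 1
        have hs3 : 3 ≤ s := by omega
        rw [pvRevA, if_neg (by omega), if_pos (by rw [pvBand1]; omega)]
        obtain ⟨k0, rfl⟩ : ∃ k0, k = k0 + 1 := ⟨k - 1, by omega⟩
        rw [pvRevA, if_neg (by omega), if_neg (by rw [pvBand1]; omega)]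
        have heq : (s - 1) >>> (1:Nat) = s >>> (1:Nat) := by rw [pvShr1, pvShr1]; omega
        rw [pvShl1, heq]
        have hhalf : 1 ≤ s >>> (1:Nat) := by rw [pvShr1]; omega
        rw [ih k0 (by omega) (s >>> (1:Nat)) hhalf ((t + 1) * 2) (by omega)
          (by rw [pvShr1]; omega) m (by rw [pvShr1]; omega)]
        have hbs : pvBitsB (m + 1) s = pvBitsB m (s >>> (1:Nat)) ++ [true] := by
          rw [pvBitsB, if_neg (by omega)]
          simp [pvBand1, hodd]
        rw [hbs, pvFromBits_concat]
        simp only [List.length_append, List.length_cons, List.length_nil]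
        obtain ⟨bs0, hb0⟩ := pvBitsB_head m (s >>> (1:Nat)) hhalf (by rw [pvShr1]; omega)
        have hlen : 1 ≤ (pvBitsB m (s >>> (1:Nat))).length := by rw [hb0]; simp
        rw [show (pvBitsB m (s >>> (1:Nat))).length + 1 - 1
            = (pvBitsB m (s >>> (1:Nat))).length by omega]
        obtain ⟨k1, hk1⟩ : ∃ k1, (pvBitsB m (s >>> (1:Nat))).length = k1 + 1 :=
          ⟨(pvBitsB m (s >>> (1:Nat))).length - 1, by omega⟩
        rw [hk1]
        simp [pow_succ]
        ring
    · -- s even : one shift step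
      have hs2 : 2 ≤ s := by omega
      rw [pvRevA, if_neg (by omega), if_neg (by rw [pvBand1]; omega)]
      have hhalf : 1 ≤ s >>> (1:Nat) := by rw [pvShr1]; omega
      rw [pvShl1]
      rw [ih k (by omega) (s >>> (1:Nat)) hhalf (t * 2) (by omega)
        (by rw [pvShr1]; omega) m (by rw [pvShr1]; omega)]
      have hbs : pvBitsB (m + 1) s = pvBitsB m (s >>> (1:Nat)) ++ [false] := by
        rw [pvBitsB, if_neg (by omega)]
        simp [pvBand1]
        omega
      rw [hbs, pvFromBits_concat]
      simp only [List.length_append, List.length_cons, List.length_nil]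
      obtain ⟨bs0, hb0⟩ := pvBitsB_head m (s >>> (1:Nat)) hhalf (by rw [pvShr1]; omega)
      have hlen : 1 ≤ (pvBitsB m (s >>> (1:Nat))).length := by rw [hb0]; simp
      rw [show (pvBitsB m (s >>> (1:Nat))).length + 1 - 1
          = (pvBitsB m (s >>> (1:Nat))).length by omega]
      obtain ⟨k1, hk1⟩ : ∃ k1, (pvBitsB m (s >>> (1:Nat))).length = k1 + 1 :=
        ⟨(pvBitsB m (s >>> (1:Nat))).length - 1, by omega⟩
      rw [hk1]
      simp [pow_succ]
      ring

-- MSB-first processor shared by the two characterisations: apply the add-one step on a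
-- set bit, then the doubling step, except that no doubling follows the final set bit
def pvProc (nv Dv Qv inv2 : Int) : List Bool → Int → Int → Int → Int × Int × Int
  | [], U, V, q => (U, V, q)
  | b :: bs, U, V, q =>
    let U1 := if b then PySem.Int.mod ((U + V) * inv2) nv else U
    let V1 := if b then PySem.Int.mod ((Dv * U + V) * inv2) nv else V
    let q1 := if b then PySem.Int.mod (q * Qv) nv else q
    if pvFromBits bs = 0 then (U1, V1, q1)
    else pvProc nv Dv Qv inv2 bs (PySem.Int.mod (U1 * V1) nv)
      (PySem.Int.mod (V1 * V1 - 2 * q1) nv) (PySem.Int.mod (q1 * q1) nv)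

-- A's LSB-driven loop over the reversed bits is the MSB-first processor
theorem pvTLoopA_proc (nv Dv Qv inv2 : Int) (l : List Bool) (fuel : Nat) (U V q : Int)
    (hf : (pvFromBits l).natAbs < fuel) :
    pvTLoopA nv Dv Qv inv2 fuel (pvFromBits l) U V q = pvProc nv Dv Qv inv2 l U V q := by
  induction l generalizing fuel U V q with
  | nil =>
    obtain ⟨k, rfl⟩ : ∃ k, fuel = k + 1 := ⟨fuel - 1, by omega⟩
    rw [pvTLoopA, pvProc]
    simp [pvFromBits]
  | cons b bs ih =>
    have hbs := pvFromBits_nonneg bs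
    obtain ⟨k, rfl⟩ : ∃ k, fuel = k + 1 := ⟨fuel - 1, by omega⟩
    rw [pvProc]
    cases b with
    | false =>
      simp only [pvFromBits, Bool.false_eq_true, if_false, zero_add] at hf ⊢
      by_cases h0 : pvFromBits bs = 0
      · rw [if_pos h0, h0, mul_zero]
        rw [pvTLoopA, if_pos rfl]
      · rw [if_neg h0]
        rw [pvTLoopA, if_neg (by omega), if_neg (by rw [pvBand1]; omega)]
        rw [show (2 * pvFromBits bs) >>> (1:Nat) = pvFromBits bs by rw [pvShr1]; omega]
        exact ih _ _ _ _ (by omega)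
    | true =>
      simp only [pvFromBits, if_true] at hf ⊢
      rw [pvTLoopA, if_neg (by omega), if_pos (by rw [pvBand1]; omega)]
      by_cases h0 : pvFromBits bs = 0
      · rw [if_pos h0]
        obtain ⟨k1, rfl⟩ : ∃ k1, k = k1 + 1 := ⟨k - 1, by omega⟩
        rw [pvTLoopA, if_pos (by omega)]
      · rw [if_neg h0]
        obtain ⟨k1, rfl⟩ : ∃ k1, k = k1 + 1 := ⟨k - 1, by omega⟩
        rw [pvTLoopA, if_neg (by omega), if_neg (by rw [pvBand1]; omega)]
        rw [show (1 + 2 * pvFromBits bs - 1) >>> (1:Nat) = pvFromBits bs by rw [pvShr1]; omega]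
        exact ih _ _ _ _ (by omega)

-- the MSB-first chain is the same processor with the (here trivial) leading doubling applied
theorem pvBitLoopB_proc (nv Dv Qv inv2 : Int) (l : List Bool)
    (hl : l.getLast? = some true) (U V q : Int) :
    pvBitLoopB nv Dv Qv inv2 l U V q =
      pvProc nv Dv Qv inv2 l (PySem.Int.mod (U * V) nv)
        (PySem.Int.mod (V * V - 2 * q) nv) (PySem.Int.mod (q * q) nv) := by
  induction l generalizing U V q with
  | nil => simp at hl
  | cons b bs ih =>
    cases bs with
    | nil =>
      simp at hl; subst hl
      rw [pvBitLoopB, pvProc]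
      simp [pvFromBits, pvBitLoopB]
    | cons c cs =>
      rw [List.getLast?_cons_cons] at hl
      have hpos := pvFromBits_pos_of_last _ hl
      rw [pvBitLoopB, pvProc]
      rw [if_neg (by omega : ¬ pvFromBits (c :: cs) = 0)]
      cases b with
      | false => simp only [Bool.false_eq_true, if_false]; rw [ih hl]
      | true => simp only [if_true]; rw [ih hl]

-- states congruent mod nv are mapped to EQUAL states by the add-one step
theorem pvAddOne_cong (nv Dv Qv inv2 : Int) (hn : 0 < nv) (x y : Int × Int × Int)
    (hU : x.1 % nv = y.1 % nv) (hV : x.2.1 % nv = y.2.1 % nv)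
    (hq : x.2.2 % nv = y.2.2 % nv) :
    pvAddOne nv Dv Qv inv2 x = pvAddOne nv Dv Qv inv2 y := by
  have hmod : ∀ a b : Int, a % nv = b % nv → PySem.Int.mod a nv = PySem.Int.mod b nv := by
    intro a b h
    rw [PySem.Int.mod_eq_emod_of_pos hn, PySem.Int.mod_eq_emod_of_pos hn, h]
  unfold pvAddOne
  rw [hmod ((x.1 + x.2.1) * inv2) ((y.1 + y.2.1) * inv2)
      (by rw [Int.mul_emod, Int.add_emod, hU, hV, ← Int.add_emod, ← Int.mul_emod]),
    hmod ((Dv * x.1 + x.2.1) * inv2) ((Dv * y.1 + y.2.1) * inv2)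
      (by rw [Int.mul_emod, Int.add_emod, Int.mul_emod Dv x.1, hU, hV, ← Int.mul_emod Dv,
        ← Int.add_emod, ← Int.mul_emod]),
    hmod (x.2.2 * Qv) (y.2.2 * Qv) (by rw [Int.mul_emod, hq, ← Int.mul_emod])]

-- states congruent mod nv are mapped to EQUAL states by the first add-one step of pvProc
theorem pvProc_cong (nv Dv Qv inv2 : Int) (hn : 0 < nv) (bs : List Bool)
    (U V q U' V' q' : Int) (hU : U % nv = U' % nv) (hV : V % nv = V' % nv)
    (hq : q % nv = q' % nv) :
    pvProc nv Dv Qv inv2 (true :: bs) U V q = pvProc nv Dv Qv inv2 (true :: bs) U' V' q' := by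
  have hmod : ∀ a b : Int, a % nv = b % nv → PySem.Int.mod a nv = PySem.Int.mod b nv := by
    intro a b h
    rw [PySem.Int.mod_eq_emod_of_pos hn, PySem.Int.mod_eq_emod_of_pos hn, h]
  have h1 : PySem.Int.mod ((U + V) * inv2) nv = PySem.Int.mod ((U' + V') * inv2) nv := by
    apply hmod
    rw [Int.mul_emod, Int.add_emod, hU, hV, ← Int.add_emod, ← Int.mul_emod]
  have h2 : PySem.Int.mod ((Dv * U + V) * inv2) nv = PySem.Int.mod ((Dv * U' + V') * inv2) nv := by
    apply hmod
    rw [Int.mul_emod, Int.add_emod, Int.mul_emod Dv U, hU, hV, ← Int.mul_emod Dv,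
      ← Int.add_emod, ← Int.mul_emod]
  have h3 : PySem.Int.mod (q * Qv) nv = PySem.Int.mod (q' * Qv) nv := by
    apply hmod
    rw [Int.mul_emod, hq, ← Int.mul_emod]
  rw [pvProc, pvProc]
  simp only [if_pos (by trivial : (True : Prop))]
  rw [h1, h2, h3]

-- appending a bit applies one more step of the chain
theorem pvBitLoopB_append (nv Dv Qv inv2 : Int) (l : List Bool) (b : Bool) (U V q : Int) :
    pvBitLoopB nv Dv Qv inv2 (l ++ [b]) U V q
      = pvStep nv Dv Qv inv2 b (pvBitLoopB nv Dv Qv inv2 l U V q) := by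
  induction l generalizing U V q with
  | nil =>
    cases b <;> simp [pvBitLoopB, pvStep, pvDouble, pvAddOne]
  | cons c cs ih =>
    cases c <;> simp only [List.cons_append, pvBitLoopB, Bool.false_eq_true, if_false,
      if_true] <;> exact ih _ _ _

-- B's recursion over a positive index is the MSB-first chain over its bits
theorem pvUvq_bits (nv Dv Qv inv2 : Int) (hn : 0 < nv) (fuel : Nat) :
    ∀ k : Int, 1 ≤ k → k.natAbs < fuel →
      pvUvqB nv Dv Qv inv2 k = pvBitLoopB nv Dv Qv inv2 (pvBitsB fuel k) 0 2 1 := by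
  induction fuel with
  | zero => intro k hk hf; omega
  | succ m ih =>
    intro k hk hf
    rw [pvBitsB, if_neg (by omega)]
    by_cases h1 : k = 1
    · subst h1
      rw [show (1:Int) >>> (1:Nat) = 0 by rw [pvShr1]; decide]
      have hz : pvBitsB m 0 = [] := by cases m <;> simp [pvBitsB]
      rw [hz, show (PySem.Int.band 1 1 == 1) = true by rw [pvBand1]; decide]
      rw [List.nil_append, pvUvqB_odd nv Dv Qv inv2 1 (by norm_num) (by decide)]
      rw [show (1:Int) - 1 = 0 from rfl, show pvUvqB nv Dv Qv inv2 0 = (0, 2, 1) by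
        rw [pvUvqB]; simp]
      rw [show pvBitLoopB nv Dv Qv inv2 [true] 0 2 1
          = pvAddOne nv Dv Qv inv2 (pvDouble nv (0, 2, 1)) by
        simp [pvBitLoopB, pvAddOne, pvDouble]]
      apply pvAddOne_cong nv Dv Qv inv2 hn
      · show (0:Int) % nv = (PySem.Int.mod (0 * 2) nv) % nv
        rw [PySem.Int.mod_eq_emod_of_pos hn]
        simp
      · show (2:Int) % nv = (PySem.Int.mod (2 * 2 - 2 * 1) nv) % nv
        rw [PySem.Int.mod_eq_emod_of_pos hn]
        norm_num [Int.emod_emod_of_dvd _ dvd_rfl]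
      · show (1:Int) % nv = (PySem.Int.mod (1 * 1) nv) % nv
        rw [PySem.Int.mod_eq_emod_of_pos hn]
        norm_num [Int.emod_emod_of_dvd _ dvd_rfl]
    · have hhalf : 1 ≤ k >>> (1:Nat) := by rw [pvShr1]; omega
      have hfm : (k >>> (1:Nat)).natAbs < m := by rw [pvShr1]; omega
      by_cases hev : k % 2 = 0
      · rw [show (PySem.Int.band k 1 == 1) = false by rw [pvBand1]; simp; omega]
        rw [pvBitLoopB_append, pvUvqB_even nv Dv Qv inv2 k (by omega) hev]
        rw [show k / 2 = k >>> (1:Nat) by rw [pvShr1]]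
        rw [ih (k >>> (1:Nat)) hhalf hfm]
        rfl
      · rw [show (PySem.Int.band k 1 == 1) = true by rw [pvBand1]; simp; omega]
        rw [pvBitLoopB_append, pvUvqB_odd nv Dv Qv inv2 k (by omega) (by omega)]
        rw [pvUvqB_even nv Dv Qv inv2 (k - 1) (by omega) (by omega)]
        rw [show (k - 1) / 2 = k >>> (1:Nat) by rw [pvShr1]; omega]
        rw [ih (k >>> (1:Nat)) hhalf hfm]
        rfl

-- the odd-part extraction factors its input: 2^r2 * s2 = 2^r * s
theorem pvOddA_factor (fuel : Nat) : ∀ (s r : Int), 1 ≤ s → 0 ≤ r → s.natAbs < fuel →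
    2 ^ ((pvOddA fuel s r).2).toNat * (pvOddA fuel s r).1 = 2 ^ r.toNat * s := by
  induction fuel with
  | zero => intro s r hs hr hf; omega
  | succ m ih =>
    intro s r hs hr hf
    rw [pvOddA]
    by_cases h1 : PySem.Int.band s 1 = 0
    · rw [if_pos h1]
      rw [pvBand1] at h1
      rw [show s >>> (1:Nat) = s / 2 from pvShr1 s]
      have := ih (s / 2) (r + 1) (by omega) (by omega) (by omega)
      rw [this, show (r + 1).toNat = r.toNat + 1 by omega, pow_succ]
      have h2 : 2 * (s / 2) = s := by omega
      calc 2 ^ r.toNat * 2 * (s / 2) = 2 ^ r.toNat * (2 * (s / 2)) := by ring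
        _ = 2 ^ r.toNat * s := by rw [h2]
    · rw [if_neg h1]

-- s positive, odd, exponent nonnegative (shape facts about the extraction)
theorem pvOddA_spec (fuel : Nat) (s r : Int) (hs : 1 ≤ s) (hr : 0 ≤ r) (hf : s.natAbs < fuel) :
    1 ≤ (pvOddA fuel s r).1 ∧ (pvOddA fuel s r).1 % 2 = 1 ∧ r ≤ (pvOddA fuel s r).2 := by
  induction fuel generalizing s r with
  | zero => omega
  | succ k ih =>
    rw [pvOddA]
    by_cases h1 : PySem.Int.band s 1 = 0
    · rw [if_pos h1]
      rw [pvBand1] at h1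
      rw [show s >>> (1:Nat) = s / 2 from pvShr1 s] at *
      have h2 := ih (s / 2) (r + 1) (by omega) (by omega) (by omega)
      exact ⟨h2.1, h2.2.1, by omega⟩
    · rw [if_neg h1]
      rw [pvBand1] at h1
      exact ⟨hs, by omega, le_rfl⟩

-- B's recursion peels powers of two into iterated doubling steps
theorem pvUvq_pow (nv Dv Qv inv2 : Int) : ∀ (rn : Nat) (s : Int), 1 ≤ s →
    pvUvqB nv Dv Qv inv2 (2 ^ rn * s) = (pvDouble nv)^[rn] (pvUvqB nv Dv Qv inv2 s) := by
  intro rn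
  induction rn with
  | zero => intro s hs; simp
  | succ m ih =>
    intro s hs
    have hpos : 0 < 2 ^ (m + 1) * s := by positivity
    have hev : (2 ^ (m + 1) * s) % 2 = 0 := by
      have h : 2 ^ (m + 1) * s = 2 * (2 ^ m * s) := by ring
      omega
    rw [pvUvqB_even nv Dv Qv inv2 _ hpos hev]
    rw [show 2 ^ (m + 1) * s / 2 = 2 ^ m * s by
      have : 2 ^ (m + 1) * s = 2 * (2 ^ m * s) := by ring
      omega]
    rw [ih s hs, Function.iterate_succ_apply']

-- A's tail doubling loop is the same iterated doubling
theorem pvRLoopA_iter (nv : Int) (fuel : Nat) : ∀ (r : Int), 0 ≤ r → r.natAbs < fuel →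
    ∀ U V q, pvRLoopA nv fuel r U V q = (pvDouble nv)^[r.toNat] (U, V, q) := by
  induction fuel with
  | zero => intro r hr hf; omega
  | succ m ih =>
    intro r hr hf U V q
    rw [pvRLoopA]
    by_cases h0 : r = 0
    · subst h0; simp
    · rw [if_neg h0]
      rw [ih (r - 1) (by omega) (by omega)]
      rw [show r.toNat = (r - 1).toNat + 1 by omega, Function.iterate_succ_apply]
      rfl

theorem pv_main (n D : Int) (hn : 1 ≤ n) : is_lucas_prp n D = is_lucas_prp_alt n D := by
  rw [is_lucas_prp, is_lucas_prp_alt]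
  obtain ⟨hs1, hs2, hr⟩ := pvOddA_spec ((n + 1).natAbs + 1) (n + 1) 0 (by omega) le_rfl (by omega)
  have hfact := pvOddA_factor ((n + 1).natAbs + 1) (n + 1) 0 (by omega) le_rfl (by omega)
  simp only [Int.toNat_zero, pow_zero, one_mul] at hfact
  set s := (pvOddA ((n + 1).natAbs + 1) (n + 1) 0).1 with hsdef
  set r := (pvOddA ((n + 1).natAbs + 1) (n + 1) 0).2 with hrdef
  set Q := (1 - D) >>> (2:Nat) with hQ
  set inv2 := (n + 1) >>> (1:Nat) with hinv2
  -- A's ladder result is the MSB-first processor over the bits of s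
  obtain ⟨bs, hbs⟩ := pvBitsB_head (s.natAbs + 1) s hs1 (by omega)
  have hrev : pvRevA (s.natAbs + 1) s 0 = pvFromBits (pvBitsB (s.natAbs + 1) s) := by
    rw [pvRevA_val (s.natAbs + 1) s hs1 0 (by omega) (by omega) (s.natAbs + 1) (by omega)]
    ring
  have hA : pvTLoopA n D Q inv2 ((pvRevA (s.natAbs + 1) s 0).natAbs + 1)
      (pvRevA (s.natAbs + 1) s 0) 0 2 1 = pvProc n D Q inv2 (pvBitsB (s.natAbs + 1) s) 0 2 1 := by
    rw [hrev, pvTLoopA_proc _ _ _ _ _ _ _ _ _ (by omega)]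
  -- B's recursion at s is that same processor (after the trivial initial doubling)
  have hB : pvUvqB n D Q inv2 s = pvProc n D Q inv2 (pvBitsB (s.natAbs + 1) s) 0 2 1 := by
    rw [pvUvq_bits n D Q inv2 (by omega) (s.natAbs + 1) s hs1 (by omega)]
    rw [pvBitLoopB_proc n D Q inv2 _ (pvBitsB_last (s.natAbs + 1) s hs1 (by omega) hs2)]
    rw [hbs]
    apply pvProc_cong n D Q inv2 (by omega)
    · rw [PySem.Int.mod_eq_emod_of_pos (by omega)]
      norm_num
    · rw [PySem.Int.mod_eq_emod_of_pos (by omega)]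
      norm_num
    · rw [PySem.Int.mod_eq_emod_of_pos (by omega)]
      norm_num
  -- B's recursion at n + 1 = 2^r * s is r doublings after B's recursion at s
  have hpow : pvUvqB n D Q inv2 (n + 1) = (pvDouble n)^[r.toNat] (pvUvqB n D Q inv2 s) := by
    rw [show n + 1 = 2 ^ r.toNat * s by omega]
    exact pvUvq_pow n D Q inv2 r.toNat s hs1
  rw [hA, hB] at *
  rw [pvRLoopA_iter n (r.natAbs + 1) r (by omega) (by omega)]
  rw [hpow, hB]

-- ===== VERDICT (by name: the statement is the Claim_ definition above) =====
theorem is_lucas_prp_spec : Claim_equal_is_lucas_prp := by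
  intro n D _ hpre
  unfold Spec_is_lucas_prp
  exact pv_main n D hpre
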